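-- pv_equiv track=rewrite | github.com/harjassand/AGI-Stack-Unchained | Extension-1/self_improve_code_v1/domains/flagship_code_rsi_v1/patch_templates_v1.py | _fix_bool_condition
-- ===== SOURCE A (Python) =====
-- def _fix_bool_condition(text: str) -> str:
--     lines = text.split("\n")
--     for i, line in enumerate(lines):
--         stripped = line.strip()
--         if stripped.startswith("if ") and stripped.endswith(":"):
--             cond = stripped[3:-1].strip()
--             lines[i] = line[: len(line) - len(line.lstrip())] + f"if bool({cond}):"
--             return "\n".join(lines)
--         if stripped.startswith("while ") and stripped.endswith(":"):
--             cond = stripped[6:-1].strip()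
--             lines[i] = line[: len(line) - len(line.lstrip())] + f"while bool({cond}):"
--             return "\n".join(lines)
--     return text
-- ===== SOURCE B (Python) =====
-- def _transform(line: str):
--     core = line.strip()
--     for kw in ("if ", "while "):
--         if core.startswith(kw) and core.endswith(":"):
--             j = 0
--             while j < len(line) and line[j].isspace():
--                 j += 1
--             return line[:j] + kw + "bool(" + core[len(kw):-1].strip() + "):"
--     return None
--
--
-- def _fix_bool_condition(text: str) -> str:
--     done = []
--     rest = text
--     while True:
--         head, sep, tail = rest.partition("\n")
--         new = _transform(head)
--         if new is not None:
--             done.append(new + sep + tail)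
--             return "".join(done)
--         if not sep:
--             return text
--         done.append(head + sep)
--         rest = tail
-- ===== Notes on version B (the rewrite author's own statement) =====
-- stated objective: alternative
-- what changed: B replaces A's split-into-a-list / indexed scan / mutate-and-rejoin with a single streaming pass that peels one line at a time off the text with str.partition, emits untouched lines into an output buffer, and rewrites the first matching if/while header in place via a keyword-table helper.
import Mathlib
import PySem

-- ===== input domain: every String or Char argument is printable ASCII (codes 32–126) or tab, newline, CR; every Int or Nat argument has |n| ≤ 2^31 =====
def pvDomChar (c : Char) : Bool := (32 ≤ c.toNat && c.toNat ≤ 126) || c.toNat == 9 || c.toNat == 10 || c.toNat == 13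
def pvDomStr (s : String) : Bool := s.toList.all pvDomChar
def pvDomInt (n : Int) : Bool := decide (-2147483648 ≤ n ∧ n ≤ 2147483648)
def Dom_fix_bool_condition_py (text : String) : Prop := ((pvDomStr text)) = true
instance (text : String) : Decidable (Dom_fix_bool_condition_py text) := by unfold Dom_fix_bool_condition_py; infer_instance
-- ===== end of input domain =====

-- B replaces A's split-into-list / indexed scan / mutate-and-rejoin with a single streaming pass that
-- peels one line at a time off the text and emits it (objective: alternative; same cost).

-- ===== PORT A =====
-- one body of A's loop: the two 'if'-blocks on a single line; some = the replacement line (A returns there)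
def pvALine (line : List Char) : Option (List Char) :=
  let stripped := PySem.Chars.strip line
  if PySem.Chars.startswith stripped "if ".toList && PySem.Chars.endswith stripped ":".toList then
    let cond := PySem.Chars.strip (PySem.List.slice stripped (some 3) (some (-1)))
    some (line.take (line.length - (PySem.Chars.lstrip line).length) ++ "if bool(".toList ++ cond ++ "):".toList)
  else if PySem.Chars.startswith stripped "while ".toList && PySem.Chars.endswith stripped ":".toList then
    let cond := PySem.Chars.strip (PySem.List.slice stripped (some 6) (some (-1)))
    some (line.take (line.length - (PySem.Chars.lstrip line).length) ++ "while bool(".toList ++ cond ++ "):".toList)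
  else
    none

-- A's 'for i, line in enumerate(lines)': some = the lines list with lines[i] replaced (early return), none = loop fell through
def pvAScan : List (List Char) → Option (List (List Char))
  | [] => none
  | line :: rest =>
    match pvALine line with
    | some newLine => some (newLine :: rest)
    | none => (pvAScan rest).map (fun ls => line :: ls)

def fix_bool_condition_py (text : String) : String :=
  let lines := PySem.Chars.splitOn text.toList ['\n']
  match pvAScan lines with
  | some ls => String.ofList (PySem.Chars.join ['\n'] ls)
  | none => text

-- ===== PORT B =====
-- Source B's _transform: the body of 'for kw in ("if ", "while ")' for one keyword
def pvKwStep (line core : List Char) (kw : List Char) : Option (List Char) :=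
  if PySem.Chars.startswith core kw && PySem.Chars.endswith core ":".toList then
    -- 'j' counts the leading isspace chars of line; line[:j] is their prefix
    some (line.takeWhile PySem.Chars.isspace ++ kw ++ "bool(".toList
          ++ PySem.Chars.strip (PySem.List.slice core (some (kw.length : Int)) (some (-1))) ++ "):".toList)
  else none

def pvTransform (line : List Char) : Option (List Char) :=
  let core := PySem.Chars.strip line
  ["if ".toList, "while ".toList].findSome? (pvKwStep line core)

-- Source B's 'while True' loop: done = the joined prefix already emitted, rest = the unprocessed suffix
def pvBLoop (orig : List Char) (done rest : List Char) : List Char :=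
  let head := rest.takeWhile (fun ch => ch ≠ '\n')
  match pvTransform head with
  | some newLine =>
    if '\n' ∈ rest then done ++ newLine ++ '\n' :: rest.drop (head.length + 1)
    else done ++ newLine
  | none =>
    if h : '\n' ∈ rest then pvBLoop orig (done ++ head ++ ['\n']) (rest.drop (head.length + 1))
    else orig
termination_by rest.length
decreasing_by
  have h0 : 0 < rest.length := List.length_pos_of_mem h
  simp only [List.length_drop]
  omega

def fix_bool_condition_py_alt (text : String) : String :=
  String.ofList (pvBLoop text.toList [] text.toList)

-- ===== PRECONDITION & SPEC =====
def Spec_fix_bool_condition_py (text : String) (out : String) : Prop := out = fix_bool_condition_py_alt text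
instance (text : String) (out : String) : Decidable (Spec_fix_bool_condition_py text out) := by unfold Spec_fix_bool_condition_py; infer_instance

-- ===== CLAIM (what is proved, stated in full; the proofs are below) =====
def Claim_equal_fix_bool_condition_py : Prop := ∀ (text : String), Dom_fix_bool_condition_py text → Spec_fix_bool_condition_py text (fix_bool_condition_py text)

-- ===== LEMMAS AND PROOFS =====

-- take (length minus length of the dropWhile suffix) IS takeWhile
theorem pv_take_sub_eq_takeWhile (p : Char → Bool) (l : List Char) :
    l.take (l.length - (l.dropWhile p).length) = l.takeWhile p := by
  induction l with
  | nil => simp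
  | cons x xs ih =>
    by_cases hp : p x
    · have hd : (List.dropWhile p xs).length ≤ xs.length := List.length_dropWhile_le p xs
      simp only [List.dropWhile_cons, hp, if_true, List.takeWhile_cons, List.length_cons]
      rw [show xs.length + 1 - (List.dropWhile p xs).length
            = (xs.length - (List.dropWhile p xs).length) + 1 by omega]
      simp [ih]
    · simp [hp]

-- the first line and the rest: takeWhile/drop decomposition at the first '\n'
theorem pv_decomp (c : Char) (l : List Char) (h : c ∈ l) :
    l.takeWhile (fun x => x ≠ c) ++ c :: l.drop ((l.takeWhile (fun x => x ≠ c)).length + 1) = l := by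
  induction l with
  | nil => simp at h
  | cons x xs ih =>
    by_cases hx : x = c
    · subst hx; simp
    · have hc : c ∈ xs := by
        rcases List.mem_cons.mp h with h' | h'
        · exact absurd h'.symm hx
        · exact h'
      simp only [List.takeWhile_cons]
      rw [if_pos (by simp [hx])]
      simp only [List.length_cons, List.cons_append, List.drop_succ_cons]
      rw [ih hc]

theorem pv_takeWhile_of_not_mem (c : Char) (l : List Char) (h : c ∉ l) :
    l.takeWhile (fun x => x ≠ c) = l := by
  induction l with
  | nil => rfl
  | cons x xs ih =>
    have hx : x ≠ c := fun e => h (e ▸ List.mem_cons_self ..)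
    have hc : c ∉ xs := fun e => h (List.mem_cons_of_mem _ e)
    simp only [List.takeWhile_cons]
    rw [if_pos (by simp [hx]), ih hc]

-- Mathlib splitOn: structural facts
theorem pv_splitOn_of_not_mem (c : Char) (l : List Char) (h : c ∉ l) :
    List.splitOn c l = [l] := by
  induction l with
  | nil => rfl
  | cons x xs ih =>
    have hx : (x == c) = false := by
      simp only [beq_eq_false_iff_ne]
      exact fun e => h (e ▸ List.mem_cons_self ..)
    have hc : c ∉ xs := fun e => h (List.mem_cons_of_mem _ e)
    simp only [List.splitOn] at ih ⊢
    rw [List.splitOnP_cons, hx]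
    simp [ih hc, List.modifyHead]

theorem pv_splitOn_append (c : Char) (a b : List Char) (h : c ∉ a) :
    List.splitOn c (a ++ c :: b) = a :: List.splitOn c b := by
  induction a with
  | nil =>
    simp only [List.splitOn, List.nil_append]
    rw [List.splitOnP_cons]
    simp
  | cons x a' ih =>
    have hx : (x == c) = false := by
      simp only [beq_eq_false_iff_ne]
      exact fun e => h (e ▸ List.mem_cons_self ..)
    have hc : c ∉ a' := fun e => h (List.mem_cons_of_mem _ e)
    simp only [List.splitOn, List.cons_append] at ih ⊢
    rw [List.splitOnP_cons, hx]
    simp [ih hc, List.modifyHead]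

-- PySem.Chars.splitOn with a one-char separator IS Mathlib's List.splitOn
theorem pv_splitOn_go (c : Char) (fuel : Nat) (l cur : List Char) (acc : List (List Char))
    (h : l.length < fuel) :
    PySem.Chars.splitOn.go [c] fuel l cur acc
      = acc.reverse ++ (List.splitOn c l).modifyHead (fun y => cur.reverse ++ y) := by
  induction fuel generalizing l cur acc with
  | zero => omega
  | succ n ih =>
    cases l with
    | nil =>
      rw [PySem.Chars.splitOn.go.eq_def]
      simp [List.splitOn, List.splitOnP_nil, List.modifyHead]
    | cons d rest =>
      have hr : rest.length < n := by
        simp only [List.length_cons] at h; omega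
      rw [PySem.Chars.splitOn.go.eq_def]
      dsimp only
      by_cases hd : d = c
      · subst hd
        rw [if_pos (by simp [List.isPrefixOf])]
        rw [show (List.drop [d].length (d :: rest)) = rest by simp]
        rw [ih _ _ _ hr]
        simp only [List.splitOn]
        rw [List.splitOnP_cons]
        simp only [BEq.rfl, if_true]
        cases List.splitOnP (fun x => x == d) rest <;>
          simp [List.modifyHead]
      · rw [if_neg (by simp [List.isPrefixOf]; exact fun e => hd e.symm)]
        rw [ih _ _ _ hr]
        simp only [List.splitOn]
        rw [List.splitOnP_cons]
        rw [show (d == c) = false from beq_eq_false_iff_ne.mpr hd]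
        simp only [Bool.false_eq_true, if_false]
        cases List.splitOnP (fun x => x == c) rest <;>
          simp [List.modifyHead]

theorem pv_splitOn_eq (c : Char) (s : List Char) :
    PySem.Chars.splitOn s [c] = List.splitOn c s := by
  unfold PySem.Chars.splitOn
  rw [pv_splitOn_go c (s.length + 1) s [] [] (by omega)]
  cases hS : List.splitOn c s with
  | nil => simp [List.modifyHead]
  | cons s0 S' => simp [List.modifyHead]

-- the per-line transformations of A and B agree
theorem pv_line_eq (line : List Char) : pvTransform line = pvALine line := by
  have ht : line.take (line.length - (PySem.Chars.lstrip line).length)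
      = line.takeWhile PySem.Chars.isspace := by
    simpa [PySem.Chars.lstrip] using pv_take_sub_eq_takeWhile PySem.Chars.isspace line
  unfold pvTransform pvALine pvKwStep
  simp only [List.findSome?_cons, List.findSome?_nil]
  by_cases h1 : (PySem.Chars.startswith (PySem.Chars.strip line) "if ".toList
      && PySem.Chars.endswith (PySem.Chars.strip line) ":".toList) = true
  · simp only [h1, if_true, ht]
    have h3 : (("if ".toList.length : Nat) : Int) = 3 := by decide
    simp only [h3]
    simp [List.append_assoc]
  · simp only [h1, Bool.false_eq_true, if_false]
    by_cases h2 : (PySem.Chars.startswith (PySem.Chars.strip line) "while ".toList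
        && PySem.Chars.endswith (PySem.Chars.strip line) ":".toList) = true
    · simp only [h2, if_true, ht]
      have h6 : (("while ".toList.length : Nat) : Int) = 6 := by decide
      simp only [h6]
      simp [List.append_assoc]
    · simp only [h2, Bool.false_eq_true, if_false]

-- the result list of A's scan is never empty
theorem pvAScan_some_ne_nil (xs ls : List (List Char)) (h : pvAScan xs = some ls) : ls ≠ [] := by
  cases xs with
  | nil => simp [pvAScan] at h
  | cons a as =>
    simp only [pvAScan] at h
    cases ha : pvALine a <;> rw [ha] at h
    · cases hs : pvAScan as <;> rw [hs] at h
      · simp at h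
      · simp only [Option.map_some, Option.some.injEq] at h
        subst h; simp
    · simp only [Option.some.injEq] at h
      subst h; simp

theorem pv_join_cons (x y : List Char) (ys : List (List Char)) :
    PySem.Chars.join ['\n'] (x :: y :: ys) = x ++ '\n' :: PySem.Chars.join ['\n'] (y :: ys) := by
  simp [PySem.Chars.join, List.intercalate, List.intersperse]

theorem pv_join_singleton (x : List Char) : PySem.Chars.join ['\n'] [x] = x := by
  simp [PySem.Chars.join, List.intercalate]

-- the streaming loop of B computes A's scan-then-rejoin
theorem pv_main (n : Nat) : ∀ (rest : List Char), rest.length = n → ∀ (done orig : List Char),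
    pvBLoop orig done rest
      = match pvAScan (List.splitOn '\n' rest) with
        | some ls => done ++ PySem.Chars.join ['\n'] ls
        | none => orig := by
  induction n using Nat.strong_induction_on with
  | _ n ih =>
    intro rest hn done orig
    rw [pvBLoop]
    by_cases h : '\n' ∈ rest
    · have hdec := pv_decomp '\n' rest h
      have hnh : '\n' ∉ rest.takeWhile (fun ch => ch ≠ '\n') := by
        intro hm
        simpa using List.mem_takeWhile_imp hm
      have hsplit : List.splitOn '\n' rest
          = rest.takeWhile (fun ch => ch ≠ '\n')
            :: List.splitOn '\n' (rest.drop ((rest.takeWhile (fun ch => ch ≠ '\n')).length + 1)) := by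
        conv_lhs => rw [← hdec]
        exact pv_splitOn_append '\n' _ _ hnh
      rw [hsplit]
      simp only [pvAScan, pv_line_eq]
      cases ha : pvALine (rest.takeWhile (fun ch => ch ≠ '\n')) with
      | some nl =>
        simp only [h, if_true]
        have hS : List.splitOn '\n' (rest.drop ((rest.takeWhile (fun ch => ch ≠ '\n')).length + 1)) ≠ [] :=
          List.splitOnP_ne_nil _ _
        have hrt : PySem.Chars.join ['\n']
            (List.splitOn '\n' (rest.drop ((rest.takeWhile (fun ch => ch ≠ '\n')).length + 1)))
            = rest.drop ((rest.takeWhile (fun ch => ch ≠ '\n')).length + 1) :=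
          List.intercalate_splitOn _ '\n'
        cases hc : List.splitOn '\n' (rest.drop ((rest.takeWhile (fun ch => ch ≠ '\n')).length + 1)) with
        | nil => exact absurd hc hS
        | cons s0 S' =>
          rw [hc] at hrt
          rw [pv_join_cons, hrt]
          simp [List.append_assoc]
      | none =>
        have hlen : (rest.drop ((rest.takeWhile (fun ch => ch ≠ '\n')).length + 1)).length < n := by
          have h0 : 0 < rest.length := List.length_pos_of_mem h
          simp only [List.length_drop]
          omega
        rw [dif_pos h, ih _ hlen _ rfl]
        cases hs : pvAScan (List.splitOn '\n'
            (rest.drop ((rest.takeWhile (fun ch => ch ≠ '\n')).length + 1))) with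
        | none => simp
        | some ls =>
          cases ls with
          | nil => exact absurd hs (fun hh => pvAScan_some_ne_nil _ _ hh rfl)
          | cons l0 ls' =>
            simp only [Option.map_some]
            rw [pv_join_cons]
            simp [List.append_assoc]
    · have htw : rest.takeWhile (fun ch => ch ≠ '\n') = rest := pv_takeWhile_of_not_mem _ _ h
      rw [pv_splitOn_of_not_mem _ _ h]
      simp only [pvAScan, pv_line_eq, htw]
      cases ha : pvALine rest with
      | some nl =>
        simp only [h, if_false]
        rw [pv_join_singleton]
      | none =>
        simp [h]

-- ===== VERDICT (by name: the statement is the Claim_ definition above) =====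
theorem fix_bool_condition_py_spec : Claim_equal_fix_bool_condition_py := by
  intro text _
  unfold Spec_fix_bool_condition_py fix_bool_condition_py fix_bool_condition_py_alt
  rw [pv_splitOn_eq, pv_main text.toList.length text.toList rfl [] text.toList]
  cases hs : pvAScan (List.splitOn '\n' text.toList) with
  | none => simp [hs, String.ofList_toList]
  | some ls => simp [hs]
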